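-- pv_equiv track=rewrite | github.com/Pyk017/Competetive-Programming | Interview_Preparation_Questions/The_Manipulator.py | calculate
-- ===== SOURCE A (Python) =====
-- def calculate(s):
--     st = list(s)
--     for i in range(len(s)):
--         if st[i] == '#':
--             for j in range(i - 1, -1, -1):
--                 if st[j].isalpha():
--                     if st[j] == 'Z':
--                         st[j] = 'A'
--                     else:
--                         st[j] = chr(ord(st[j]) + 1)
--                     break
--     return ''.join(st)
-- ===== SOURCE B (Python) =====
-- def calculate(s):
--     out = list(s)
--     last = -1                       # index of the most recent letter seen
--     for i, ch in enumerate(s):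
--         if ch.isalpha():
--             last = i
--         elif ch == '#' and last >= 0:
--             c = out[last]
--             out[last] = 'A' if c == 'Z' else 'a' if c == 'z' else chr(ord(c) + 1)
--     return ''.join(out)
-- ===== Notes on version B (the rewrite author's own statement) =====
-- stated objective: alternative
-- what changed: B replaces A's quadratic backwards rescan at every '#' by one left-to-right pass that keeps the index of the most recent letter and increments it in place in O(1).
-- intended difference: On strings where a lowercase letter is followed (before any other letter) by more '#' than 'z' minus that letter, A increments it past 'z' into the non-letter '{' (A only wraps 'Z'), while B wraps lowercase 'z' to 'a' exactly as it wraps 'Z' to 'A', the intended cyclic increment. — e.g. on calculate("z#"): A returns "{#", B returns "a#"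
import Mathlib
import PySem

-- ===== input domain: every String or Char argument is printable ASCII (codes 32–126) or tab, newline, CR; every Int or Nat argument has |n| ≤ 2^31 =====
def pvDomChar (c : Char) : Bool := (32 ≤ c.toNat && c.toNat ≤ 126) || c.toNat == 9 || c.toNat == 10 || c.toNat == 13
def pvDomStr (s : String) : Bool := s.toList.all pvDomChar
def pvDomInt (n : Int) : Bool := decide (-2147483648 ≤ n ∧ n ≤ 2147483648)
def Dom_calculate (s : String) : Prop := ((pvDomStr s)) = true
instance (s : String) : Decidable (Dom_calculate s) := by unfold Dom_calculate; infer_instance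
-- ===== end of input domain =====

-- B is a single left-to-right pass that keeps the index of the most recent
-- letter and increments it in place, instead of A's backwards rescan at every '#'.

-- ===== PORT A =====
-- inner loop: for j in range(i-1,-1,-1): find nearest alphabetic char, bump it, break
-- (fuel = j+1; indices scanned are always in range in A, so getD is exact)
def goBack : List Char → Nat → List Char
  | st, 0 => st
  | st, j+1 =>
    let ch := st.getD j ' '
    if PySem.Chars.isalpha ch then
      st.set j (if ch == 'Z' then 'A' else Char.ofNat (ch.toNat + 1))
    else goBack st j

def calculate (s : String) : String :=
  String.ofList ((List.range s.toList.length).foldl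
    (fun st i => if st.getD i ' ' == '#' then goBack st i else st) s.toList)

-- ===== PORT B =====
-- loop body of Source B: a letter updates `last`; a '#' (with last >= 0) increments
-- out[last] in place, wrapping 'Z' to 'A' and 'z' to 'a' (last is in range there)
def stepB (p : List Char × Int) (ic : Int × Char) : List Char × Int :=
  if PySem.Chars.isalpha ic.2 then (p.1, ic.1)
  else if ic.2 = '#' ∧ 0 ≤ p.2 then
    let c := p.1.getD p.2.toNat ' '
    (p.1.set p.2.toNat
      (if c == 'Z' then 'A' else if c == 'z' then 'a' else Char.ofNat (c.toNat + 1)), p.2)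
  else p

def calculate_alt (s : String) : String :=
  String.ofList ((PySem.List.enumerate s.toList 0).foldl stepB (s.toList, -1)).1

-- ===== PRECONDITION & SPEC =====
-- On strings where a lowercase letter is followed (before any other letter) by more '#'
-- than 'z' minus that letter, A increments it past 'z' into the non-letter '{' (A only
-- wraps 'Z'), while B wraps lowercase 'z' to 'a' exactly as it wraps 'Z' to 'A', the
-- intended cyclic increment.
-- a suffix starting with a lowercase letter c whose following letter-free stretch
-- holds more '#' than 'z' - c
def pastZ : List Char → Bool
  | c :: r => c.isLower && decide (122 < (r.takeWhile (fun x => !x.isAlpha)).count '#' + c.toNat)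
  | [] => false

def D_calculate (s : String) : Prop := ∃ t ∈ s.toList.tails, pastZ t = true
instance (s : String) : Decidable (D_calculate s) := by unfold D_calculate; infer_instance

def Spec_calculate (s : String) (out : String) : Prop := ¬ D_calculate s → out = calculate_alt s
instance (s : String) (out : String) : Decidable (Spec_calculate s out) := by
  unfold Spec_calculate; infer_instance

def pvDiffWitness_calculate : String := "z#"
def pvDiffWitnessOut_calculate : String × String := ("{#", "a#")

-- ===== CLAIM (what is proved, stated in full; the proofs are below) =====
def Claim_unchanged_calculate : Prop := ∀ (s : String), Dom_calculate s → Spec_calculate s (calculate s)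
def Claim_changed_calculate : Prop := Dom_calculate pvDiffWitness_calculate ∧ D_calculate pvDiffWitness_calculate ∧ calculate pvDiffWitness_calculate = pvDiffWitnessOut_calculate.1 ∧ calculate_alt pvDiffWitness_calculate = pvDiffWitnessOut_calculate.2 ∧ pvDiffWitnessOut_calculate.1 ≠ pvDiffWitnessOut_calculate.2
def Claim_exact_calculate : Prop := ∀ (s : String), Dom_calculate s → D_calculate s → calculate s ≠ calculate_alt s

-- ===== LEMMAS AND PROOFS =====

-- ---- proof-layer definitions ----
def stepA : List Char → Nat → List Char :=
  fun st i => if st.getD i ' ' == '#' then goBack st i else st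

def incA (c : Char) : Char := if c == 'Z' then 'A' else Char.ofNat (c.toNat + 1)

def incB (c : Char) : Char :=
  if c == 'Z' then 'A' else if c == 'z' then 'a' else Char.ofNat (c.toNat + 1)

def seg (l : List Char) (j i : Nat) : List Char := (l.take i).drop (j+1)

def hits (l : List Char) (j i : Nat) : Nat :=
  ((seg l j i).takeWhile (fun c => !PySem.Chars.isalpha c)).count '#'

def mtot (l : List Char) (j : Nat) : Nat :=
  ((l.drop (j+1)).takeWhile (fun c => !PySem.Chars.isalpha c)).count '#'

def noOv (l : List Char) : Prop :=
  ∀ j, j < l.length → PySem.Chars.islower (l.getD j ' ') = true →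
    mtot l j + (l.getD j ' ').toNat ≤ 122

def lastSpec (l : List Char) (i : Nat) (last : Int) : Prop :=
  (last = -1 ∧ ∀ j, j < i → PySem.Chars.isalpha (l.getD j ' ') = false) ∨
  (∃ k : Nat, last = (k : Int) ∧ k < i ∧ PySem.Chars.isalpha (l.getD k ' ') = true ∧
    ∀ j, k < j → j < i → PySem.Chars.isalpha (l.getD j ' ') = false)

-- ---- char facts ----
lemma islower_iff (c : Char) :
    PySem.Chars.islower c = true ↔ 97 ≤ c.toNat ∧ c.toNat ≤ 122 := by
  simp only [PySem.Chars.islower, Char.le_def, UInt32.le_iff_toNat_le, Bool.and_eq_true,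
    decide_eq_true_eq]
  have hc : c.toNat = c.val.toNat := rfl
  have ha : 'a'.val.toNat = 97 := rfl
  have hz : 'z'.val.toNat = 122 := rfl
  omega

lemma isupper_iff (c : Char) :
    PySem.Chars.isupper c = true ↔ 65 ≤ c.toNat ∧ c.toNat ≤ 90 := by
  simp only [PySem.Chars.isupper, Char.le_def, UInt32.le_iff_toNat_le, Bool.and_eq_true,
    decide_eq_true_eq]
  have hc : c.toNat = c.val.toNat := rfl
  have hA : 'A'.val.toNat = 65 := rfl
  have hZ : 'Z'.val.toNat = 90 := rfl
  omega

lemma isalpha_cases {c : Char} (h : PySem.Chars.isalpha c = true) :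
    PySem.Chars.isupper c = true ∨ PySem.Chars.islower c = true := by
  simp only [PySem.Chars.isalpha, Bool.or_eq_true] at h
  exact h

lemma isalpha_of_upper {c : Char} (h : PySem.Chars.isupper c = true) :
    PySem.Chars.isalpha c = true := by
  simp [PySem.Chars.isalpha, h]

lemma isalpha_of_lower {c : Char} (h : PySem.Chars.islower c = true) :
    PySem.Chars.isalpha c = true := by
  simp [PySem.Chars.isalpha, h]

lemma toNat_ofNat_small {n : Nat} (h : n ≤ 200) : (Char.ofNat n).toNat = n := by
  rw [Char.toNat_ofNat, if_pos]
  left; omega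

lemma char_eq_iff_toNat {c d : Char} : c = d ↔ c.toNat = d.toNat := by
  constructor
  · intro h; rw [h]
  · intro h
    apply Char.ext
    apply UInt32.toNat_inj.mp
    exact h

lemma incA_upper {c : Char} (h : PySem.Chars.isupper c = true) :
    PySem.Chars.isupper (incA c) = true := by
  obtain ⟨h1, h2⟩ := (isupper_iff c).mp h
  unfold incA
  by_cases hz : c = 'Z'
  · simp [hz]; decide
  · rw [if_neg (by simpa using hz)]
    rw [char_eq_iff_toNat] at hz
    have hZ : 'Z'.toNat = 90 := rfl
    rw [isupper_iff, toNat_ofNat_small (by omega)]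
    omega

lemma iter_upper {c : Char} (h : PySem.Chars.isupper c = true) (n : Nat) :
    PySem.Chars.isupper (incA^[n] c) = true := by
  induction n generalizing c with
  | zero => exact h
  | succ n ih =>
    rw [Function.iterate_succ_apply]
    exact ih (incA_upper h)

lemma iter_lower {c : Char} (n : Nat) (h : PySem.Chars.islower c = true)
    (hb : c.toNat + n ≤ 122) :
    (incA^[n] c).toNat = c.toNat + n ∧ PySem.Chars.islower (incA^[n] c) = true := by
  induction n generalizing c with
  | zero => exact ⟨rfl, h⟩
  | succ n ih =>
    obtain ⟨h1, h2⟩ := (islower_iff c).mp h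
    rw [Function.iterate_succ_apply]
    have hz : (c == 'Z') = false := by
      rw [beq_eq_false_iff_ne]
      intro hc
      rw [char_eq_iff_toNat] at hc
      have : 'Z'.toNat = 90 := rfl
      omega
    have hstep : incA c = Char.ofNat (c.toNat + 1) := by
      unfold incA; rw [hz]; simp
    have hval : (incA c).toNat = c.toNat + 1 := by
      rw [hstep, toNat_ofNat_small (by omega)]
    have hlow : PySem.Chars.islower (incA c) = true := by
      rw [islower_iff, hval]; omega
    obtain ⟨ih1, ih2⟩ := ih hlow (by omega)
    exact ⟨by rw [ih1, hval]; omega, ih2⟩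

lemma incA_eq_incB_of_ne_z {c : Char} (h : c.toNat ≠ 122) : incA c = incB c := by
  unfold incA incB
  have hzl : (c == 'z') = false := by
    rw [beq_eq_false_iff_ne]
    intro hc
    rw [char_eq_iff_toNat] at hc
    have : 'z'.toNat = 122 := rfl
    omega
  by_cases hz : (c == 'Z') = true
  · rw [if_pos hz, if_pos hz]
  · rw [if_neg hz, if_neg hz, hzl]
    simp

lemma alpha_hash : PySem.Chars.isalpha '#' = false := by decide

-- ---- takeWhile / seg / hits facts ----
lemma takeWhile_all {p : Char → Bool} : ∀ {xs : List Char},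
    (∀ x ∈ xs, p x = true) → xs.takeWhile p = xs := by
  intro xs
  induction xs with
  | nil => intro _; rfl
  | cons a t ih =>
    intro h
    rw [List.takeWhile_cons, if_pos (h a (by simp))]
    rw [ih (fun x hx => h x (by simp [hx]))]

lemma takeWhile_append_all {p : Char → Bool} {xs ys : List Char}
    (h : ∀ x ∈ xs, p x = true) :
    (xs ++ ys).takeWhile p = xs ++ ys.takeWhile p := by
  induction xs with
  | nil => simp
  | cons a t ih =>
    rw [List.cons_append, List.takeWhile_cons, if_pos (h a (by simp))]
    rw [ih (fun x hx => h x (by simp [hx])), List.cons_append]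

lemma takeWhile_append_stop {p : Char → Bool} : ∀ {xs : List Char} (ys : List Char),
    ¬ (∀ x ∈ xs, p x = true) → (xs ++ ys).takeWhile p = xs.takeWhile p := by
  intro xs
  induction xs with
  | nil => intro ys h; exact absurd (by simp) h
  | cons a t ih =>
    intro ys h
    rw [List.cons_append, List.takeWhile_cons, List.takeWhile_cons]
    by_cases hpa : p a = true
    · rw [if_pos hpa, if_pos hpa, ih ys]
      intro hall
      exact h (by
        intro x hx
        rcases List.mem_cons.mp hx with rfl | hm
        · exact hpa
        · exact hall x hm)
    · rw [if_neg hpa, if_neg hpa]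

lemma seg_succ {l : List Char} {j i : Nat} (hj : j < i) (hi : i < l.length) :
    seg l j (i+1) = seg l j i ++ [l.getD i ' '] := by
  unfold seg
  rw [List.take_add_one, List.getElem?_eq_getElem hi]
  simp only [Option.toList_some]
  rw [List.drop_append_of_le_length (by simp; omega)]
  rw [List.getD_eq_getElem _ _ hi]

lemma mem_seg {l : List Char} {x : Char} {j i : Nat} (hx : x ∈ seg l j i) :
    ∃ q, j < q ∧ q < i ∧ q < l.length ∧ l.getD q ' ' = x := by
  unfold seg at hx
  obtain ⟨idx, hidx, hget⟩ := List.mem_iff_getElem.mp hx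
  have hlen : idx + (j+1) < (l.take i).length := by
    simp only [List.length_drop] at hidx
    omega
  have hlen' : j + 1 + idx < (l.take i).length := by omega
  have hlt : j + 1 + idx < l.length := by
    simp only [List.length_take] at hlen'
    omega
  have hlti : j + 1 + idx < i := by
    simp only [List.length_take] at hlen'
    omega
  refine ⟨j + 1 + idx, by omega, hlti, hlt, ?_⟩
  rw [List.getD_eq_getElem _ _ hlt]
  rw [← hget]
  rw [List.getElem_drop]
  rw [List.getElem_take]

lemma getD_mem_seg {l : List Char} {j q i : Nat} (h1 : j < q) (h2 : q < i)
    (h3 : q < l.length) : l.getD q ' ' ∈ seg l j i := by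
  unfold seg
  rw [List.getD_eq_getElem _ _ h3]
  apply List.mem_iff_getElem.mpr
  have hlen : q - (j+1) < ((l.take i).drop (j+1)).length := by
    simp only [List.length_drop, List.length_take]
    omega
  refine ⟨q - (j+1), hlen, ?_⟩
  rw [List.getElem_drop]
  have : j + 1 + (q - (j + 1)) = q := by omega
  simp only [this]
  rw [List.getElem_take]

lemma hits_self (l : List Char) (i : Nat) : hits l i (i+1) = 0 := by
  unfold hits seg
  rw [List.drop_eq_nil_of_le (by simp)]
  rfl

lemma hits_succ_no_hash {l : List Char} {j i : Nat} (hj : j < i) (hi : i < l.length)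
    (hc : PySem.Chars.isalpha (l.getD i ' ') = true ∨ l.getD i ' ' ≠ '#') :
    hits l j (i+1) = hits l j i := by
  unfold hits
  rw [seg_succ hj hi]
  generalize hx : l.getD i ' ' = x at hc
  by_cases hall : ∀ x ∈ seg l j i, (!PySem.Chars.isalpha x) = true
  · rw [takeWhile_append_all hall, takeWhile_all hall, List.count_append]
    rcases hc with hc | hc
    · rw [List.takeWhile_cons, if_neg (by simp [hc])]
      rfl
    · cases h : (!PySem.Chars.isalpha x)
      · rw [List.takeWhile_cons, if_neg (by simp [h])]
        rfl
      · rw [List.takeWhile_cons, if_pos (by simp [h]), List.takeWhile_nil]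
        simp [hc]
  · rw [takeWhile_append_stop _ hall]

lemma hits_succ_hash {l : List Char} {j i : Nat} (hj : j < i) (hi : i < l.length)
    (hgap : ∀ q, j < q → q < i → PySem.Chars.isalpha (l.getD q ' ') = false)
    (hc : l.getD i ' ' = '#') :
    hits l j (i+1) = hits l j i + 1 := by
  unfold hits
  have hall : ∀ x ∈ seg l j i, (!PySem.Chars.isalpha x) = true := by
    intro x hx
    obtain ⟨q, hq1, hq2, hq3, rfl⟩ := mem_seg hx
    rw [hgap q hq1 hq2]
    rfl
  rw [seg_succ hj hi, takeWhile_append_all hall, takeWhile_all hall, List.count_append]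
  generalize hx : l.getD i ' ' = x at hc
  subst hc
  rw [List.takeWhile_cons, if_pos (by simp [alpha_hash]), List.takeWhile_nil]
  simp

lemma hits_succ_of_alpha_between {l : List Char} {j i : Nat} (hj : j < i)
    (hi : i < l.length) {q : Nat} (hq1 : j < q) (hq2 : q < i)
    (hq3 : PySem.Chars.isalpha (l.getD q ' ') = true) :
    hits l j (i+1) = hits l j i := by
  unfold hits
  rw [seg_succ hj hi, takeWhile_append_stop]
  intro hall
  have hm : l.getD q ' ' ∈ seg l j i := getD_mem_seg hq1 hq2 (by omega)
  have := hall _ hm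
  rw [hq3] at this
  simp at this

lemma count_takeWhile_take_le (p : Char → Bool) (v : Char) :
    ∀ (xs : List Char) (k : Nat),
      (((xs.take k).takeWhile p).count v) ≤ ((xs.takeWhile p).count v) := by
  intro xs
  induction xs with
  | nil => intro k; simp
  | cons a t ih =>
    intro k
    cases k with
    | zero => simp
    | succ k =>
      rw [List.take_succ_cons, List.takeWhile_cons, List.takeWhile_cons]
      by_cases hpa : p a = true
      · rw [if_pos hpa, if_pos hpa]
        simp only [List.count_cons]
        have := ih k
        omega
      · rw [if_neg hpa, if_neg hpa]

lemma hits_le_mtot (l : List Char) (j i : Nat) : hits l j i ≤ mtot l j := by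
  unfold hits mtot seg
  rw [List.drop_take]
  exact count_takeWhile_take_le _ _ _ _

-- ---- goBack facts ----
lemma getD_set_self' (l : List Char) (j : Nat) (a d : Char) (h : j < l.length) :
    (l.set j a).getD j d = a := by
  simp [List.getD_eq_getElem?_getD, h]

lemma getD_set_ne' (l : List Char) (j k : Nat) (a d : Char) (h : j ≠ k) :
    (l.set j a).getD k d = l.getD k d := by
  simp [List.getD_eq_getElem?_getD, h]

lemma goBack_skip : ∀ (m : Nat) (st : List Char) (n : Nat),
    (∀ j, j < m → PySem.Chars.isalpha (st.getD (n + j) ' ') = false) →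
    goBack st (n + m) = goBack st n
  | 0, st, n, _ => rfl
  | m+1, st, n, h => by
    have hm := h m (by omega)
    show goBack st ((n + m) + 1) = goBack st n
    simp only [goBack, hm]
    simp only [Bool.false_eq_true, if_false]
    exact goBack_skip m st n (fun j hj => h j (by omega))

lemma goBack_hit {st : List Char} {n : Nat}
    (h : PySem.Chars.isalpha (st.getD n ' ') = true) :
    goBack st (n + 1) = st.set n (incA (st.getD n ' ')) := by
  simp only [goBack, h, if_true]
  rfl

-- ---- main simulation ----
lemma run_eq (l : List Char) (hno : noOv l) :
    ∀ (k i : Nat) (st : List Char) (last : Int), i + k = l.length →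
    st.length = l.length →
    (∀ j, ¬(j < i ∧ PySem.Chars.isalpha (l.getD j ' ') = true) →
      st.getD j ' ' = l.getD j ' ') →
    (∀ j, j < i → PySem.Chars.isalpha (l.getD j ' ') = true →
      st.getD j ' ' = incA^[hits l j i] (l.getD j ' ')) →
    lastSpec l i last →
    (List.range' i k).foldl stepA st
      = ((PySem.List.enumerate (l.drop i) (i : Int)).foldl stepB (st, last)).1
  | 0, i, st, last, hik, _, _, _, _ => by
    have hd : l.drop i = [] := List.drop_eq_nil_of_le (by omega)
    rw [hd]
    rfl
  | k+1, i, st, last, hik, hlen, hC2, hC3, hLS => by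
    have hi : i < l.length := by omega
    have hdrop : l.drop i = l.getD i ' ' :: l.drop (i+1) := by
      rw [List.getD_eq_getElem _ _ hi]
      exact List.drop_eq_getElem_cons hi
    rw [List.range'_succ, List.foldl_cons, hdrop, PySem.List.enumerate_cons,
      List.foldl_cons]
    have hcast : (i : Int) + 1 = ((i+1 : Nat) : Int) := by push_cast; ring
    set c := l.getD i ' ' with hc
    have hsti : st.getD i ' ' = c := hC2 i (by omega)
    by_cases hal : PySem.Chars.isalpha c = true
    · -- a letter: A does nothing, B moves the pointer
      have hA : stepA st i = st := by
        unfold stepA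
        rw [hsti, if_neg]
        simp only [beq_iff_eq]
        intro hcc
        rw [hcc] at hal
        rw [alpha_hash] at hal
        exact absurd hal (by simp)
      have hB : stepB (st, last) ((i : Int), c) = (st, (i : Int)) := by
        unfold stepB
        rw [if_pos hal]
      rw [hA, hB, hcast]
      apply run_eq l hno k (i+1) st (i : Int) (by omega) hlen
      · intro j hj
        exact hC2 j (by
          intro ⟨h1, h2⟩
          exact hj ⟨by omega, h2⟩)
      · intro j hj hja
        by_cases hji : j = i
        · subst hji
          rw [hits_self, Function.iterate_zero_apply]
          exact hC2 j (by omega)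
        · have hji' : j < i := by omega
          rw [hits_succ_no_hash hji' hi (Or.inl hal)]
          exact hC3 j hji' hja
      · right
        exact ⟨i, rfl, by omega, hal, fun j h1 h2 => by omega⟩
    · have hal' : PySem.Chars.isalpha c = false := by
        cases h : PySem.Chars.isalpha c
        · rfl
        · exact absurd h hal
      by_cases hhash : c = '#'
      · -- a '#': A scans back, B uses the pointer
        rcases hLS with ⟨hl1, hl2⟩ | ⟨kk, hl1, hl2, hl3, hl4⟩
        · -- no letter yet: both no-ops
          have hA : stepA st i = st := by
            unfold stepA
            rw [hsti, hhash, if_pos (by simp)]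
            have h0 : goBack st (0 + i) = goBack st 0 := by
              apply goBack_skip
              intro j hj
              rw [Nat.zero_add]
              rw [hC2 j (by
                intro ⟨h1, h2⟩
                rw [hl2 j hj] at h2
                exact absurd h2 (by simp))]
              exact hl2 j hj
            rw [Nat.zero_add] at h0
            rw [h0]
            rfl
          have hB : stepB (st, last) ((i : Int), c) = (st, last) := by
            unfold stepB
            rw [if_neg (by simp [hal']), if_neg]
            intro ⟨_, hge⟩
            rw [hl1] at hge
            omega
          rw [hA, hB, hcast]
          apply run_eq l hno k (i+1) st last (by omega) hlen
          · intro j hj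
            exact hC2 j (by
              intro ⟨h1, h2⟩
              exact hj ⟨by omega, h2⟩)
          · intro j hj hja
            by_cases hji : j = i
            · subst hji
              rw [← hc] at hja
              rw [hja] at hal'
              exact absurd hal' (by simp)
            · have := hl2 j (by omega)
              rw [this] at hja
              exact absurd hja (by simp)
          · left
            refine ⟨hl1, fun j hj => ?_⟩
            by_cases hji : j = i
            · subst hji
              rw [← hc, hhash]
              exact alpha_hash
            · exact hl2 j (by omega)
        · -- pointer at kk: both bump position kk
          set ck := l.getD kk ' ' with hck
          have hh : st.getD kk ' ' = incA^[hits l kk i] ck := hC3 kk hl2 hl3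
          -- the budget: one more hit still fits below 'z'
          have hsucc : hits l kk (i+1) = hits l kk i + 1 :=
            hits_succ_hash hl2 hi (fun q h1 h2 => by
              have := hl4 q h1 h2
              exact this) hhash
          have hle : hits l kk i + 1 ≤ mtot l kk := by
            have := hits_le_mtot l kk (i+1)
            omega
          have hcur_facts : PySem.Chars.isalpha (st.getD kk ' ') = true ∧
              (st.getD kk ' ').toNat ≠ 122 := by
            rcases isalpha_cases hl3 with hup | hlo
            · constructor
              · rw [hh]
                exact isalpha_of_upper (iter_upper hup _)
              · rw [hh]
                have := (isupper_iff _).mp (iter_upper hup (hits l kk i))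
                omega
            · have hbound : ck.toNat + (hits l kk i + 1) ≤ 122 := by
                have hm := hno kk (by omega) (by rw [← hck]; exact hlo)
                rw [← hck] at hm
                omega
              obtain ⟨hv, hl'⟩ := iter_lower (hits l kk i) hlo (by omega)
              constructor
              · rw [hh]
                exact isalpha_of_lower hl'
              · rw [hh, hv]
                omega
          obtain ⟨hca, hcz⟩ := hcur_facts
          have hstep_val : incA (st.getD kk ' ') = incA^[hits l kk (i+1)] ck := by
            rw [hsucc, Function.iterate_succ_apply', hh]
          have hA : stepA st i = st.set kk (incA (st.getD kk ' ')) := by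
            unfold stepA
            rw [hsti, hhash, if_pos (by simp)]
            have hsplit : i = (kk + 1) + (i - kk - 1) := by omega
            rw [hsplit]
            rw [goBack_skip (i - kk - 1) st (kk+1) (fun j hj => by
              have h1 : kk < kk + 1 + j := by omega
              have h2 : kk + 1 + j < i := by omega
              rw [hC2 (kk+1+j) (by
                intro ⟨_, h3⟩
                rw [hl4 _ h1 h2] at h3
                exact absurd h3 (by simp))]
              exact hl4 _ h1 h2)]
            exact goBack_hit hca
          have hB : stepB (st, last) ((i : Int), c)
              = (st.set kk (incB (st.getD kk ' ')), last) := by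
            unfold stepB
            rw [if_neg (by simp [hal']), if_pos ⟨hhash, by rw [hl1]; omega⟩]
            rw [hl1]
            simp only [Int.toNat_natCast]
            rfl
          have hAB : incA (st.getD kk ' ') = incB (st.getD kk ' ') :=
            incA_eq_incB_of_ne_z hcz
          rw [hA, hB, ← hAB, hcast, hl1]
          apply run_eq l hno k (i+1) (st.set kk (incA (st.getD kk ' '))) (kk : Int)
            (by omega) (by rw [List.length_set]; exact hlen)
          · intro j hj
            have hjk : j ≠ kk := by
              intro h
              subst h
              exact hj ⟨by omega, hl3⟩
            rw [getD_set_ne' _ _ _ _ _ (fun h => hjk h.symm)]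
            exact hC2 j (by
              intro ⟨h1, h2⟩
              exact hj ⟨by omega, h2⟩)
          · intro j hj hja
            by_cases hjk : j = kk
            · subst hjk
              rw [getD_set_self' _ _ _ _ (by rw [hlen]; omega)]
              rw [hstep_val]
            · rw [getD_set_ne' _ _ _ _ _ (fun h => hjk h.symm)]
              have hji : j < i := by
                rcases Nat.lt_or_ge j i with h | h
                · exact h
                · have hji' : j = i := by omega
                  subst hji'
                  rw [← hc] at hja
                  rw [hja] at hal'
                  exact absurd hal' (by simp)
              have hjkk : j < kk := by
                rcases Nat.lt_or_ge j kk with h | h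
                · exact h
                · have : kk < j := by omega
                  rw [hl4 j this hji] at hja
                  exact absurd hja (by simp)
              rw [hits_succ_of_alpha_between hji hi hjkk hl2 hl3]
              exact hC3 j hji hja
          · right
            refine ⟨kk, rfl, by omega, hl3, fun j h1 h2 => ?_⟩
            by_cases hji : j = i
            · subst hji
              rw [← hc, hhash]
              exact alpha_hash
            · exact hl4 j h1 (by omega)
      · -- an ordinary character: both no-ops
        have hA : stepA st i = st := by
          unfold stepA
          rw [hsti, if_neg (by simpa using hhash)]
        have hB : stepB (st, last) ((i : Int), c) = (st, last) := by
          unfold stepB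
          rw [if_neg (by simp [hal']), if_neg (by
            intro ⟨h1, _⟩
            exact hhash h1)]
        rw [hA, hB, hcast]
        apply run_eq l hno k (i+1) st last (by omega) hlen
        · intro j hj
          exact hC2 j (by
            intro ⟨h1, h2⟩
            exact hj ⟨by omega, h2⟩)
        · intro j hj hja
          by_cases hji : j = i
          · subst hji
            rw [← hc] at hja
            rw [hja] at hal'
            exact absurd hal' (by simp)
          · have hji' : j < i := by omega
            rw [hits_succ_no_hash hji' hi (Or.inr hhash)]
            exact hC3 j hji' hja
        · rcases hLS with ⟨hl1, hl2⟩ | ⟨kk, hl1, hl2, hl3, hl4⟩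
          · left
            refine ⟨hl1, fun j hj => ?_⟩
            by_cases hji : j = i
            · subst hji
              exact hal'
            · exact hl2 j (by omega)
          · right
            refine ⟨kk, hl1, by omega, hl3, fun j h1 h2 => ?_⟩
            by_cases hji : j = i
            · subst hji
              exact hal'
            · exact hl4 j h1 (by omega)

-- ===== VERDICT (by name: the statement is the Claim_ definition above) =====
lemma isLower_eq (c : Char) : c.isLower = PySem.Chars.islower c := by
  rw [Bool.eq_iff_iff, islower_iff]
  simp only [Char.isLower, ge_iff_le, UInt32.le_iff_toNat_le, Bool.and_eq_true, decide_eq_true_eq]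
  have hc : c.toNat = c.val.toNat := rfl
  have ha : 'a'.val.toNat = 97 := rfl
  have hz : 'z'.val.toNat = 122 := rfl
  omega

lemma isUpper_eq (c : Char) : c.isUpper = PySem.Chars.isupper c := by
  rw [Bool.eq_iff_iff, isupper_iff]
  simp only [Char.isUpper, ge_iff_le, UInt32.le_iff_toNat_le, decide_eq_true_eq]
  have hc : c.toNat = c.val.toNat := rfl
  have ha : 'A'.val.toNat = 65 := rfl
  have hz : 'Z'.val.toNat = 90 := rfl
  omega

lemma drop_mem_tails : ∀ (l : List Char) (n : Nat), l.drop n ∈ l.tails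
  | l, 0 => by simp
  | [], n+1 => by simp
  | a :: t, n+1 => by
    rw [List.drop_succ_cons, List.tails_cons, List.mem_cons]
    exact Or.inr (drop_mem_tails t n)

lemma isAlpha_eq (c : Char) : c.isAlpha = PySem.Chars.isalpha c := by
  rw [Char.isAlpha, PySem.Chars.isalpha, isUpper_eq, isLower_eq]

theorem calculate_spec : Claim_unchanged_calculate := by
  intro s _hdom
  unfold Spec_calculate
  intro hnd
  have hno : noOv s.toList := by
    intro j hj hlo
    by_contra hgt
    apply hnd
    refine ⟨s.toList.drop j, drop_mem_tails _ _, ?_⟩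
    rw [show s.toList.drop j = s.toList.getD j ' ' :: s.toList.drop (j+1) by
      rw [List.getD_eq_getElem _ _ hj]; exact List.drop_eq_getElem_cons hj]
    have hfun : (fun x : Char => !x.isAlpha) = (fun x => !PySem.Chars.isalpha x) := by
      funext x
      rw [isAlpha_eq]
    rw [show pastZ (s.toList.getD j ' ' :: s.toList.drop (j+1))
        = ((s.toList.getD j ' ').isLower && decide (122 <
            ((s.toList.drop (j+1)).takeWhile (fun x => !x.isAlpha)).count '#'
              + (s.toList.getD j ' ').toNat)) from rfl]
    rw [isLower_eq, hlo, hfun]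
    unfold mtot at hgt
    simp only [Bool.true_and, decide_eq_true_eq]
    omega
  show String.ofList ((List.range s.toList.length).foldl stepA s.toList)
      = String.ofList ((PySem.List.enumerate s.toList 0).foldl stepB (s.toList, -1)).1
  congr 1
  rw [List.range_eq_range']
  have h0 : PySem.List.enumerate s.toList 0
      = PySem.List.enumerate (s.toList.drop 0) ((0 : Nat) : Int) := by
    rw [List.drop_zero]
    norm_num
  rw [h0]
  apply run_eq s.toList hno s.toList.length 0 s.toList (-1) (by omega) rfl
  · intro j _
    rfl
  · intro j hj
    omega
  · left
    exact ⟨rfl, fun j hj => by omega⟩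

theorem calculate_changed : Claim_changed_calculate := by
  unfold Claim_changed_calculate
  decide


-- ---- tightness: inside D_ the two outputs really differ ----

lemma incA_alpha_of_ne_z {c : Char} (ha : PySem.Chars.isalpha c = true)
    (hz : c.toNat ≠ 122) : PySem.Chars.isalpha (incA c) = true := by
  rcases isalpha_cases ha with hup | hlo
  · exact isalpha_of_upper (incA_upper hup)
  · obtain ⟨h1, h2⟩ := (islower_iff c).mp hlo
    have hZ : (c == 'Z') = false := by
      rw [beq_eq_false_iff_ne]
      intro hc
      rw [char_eq_iff_toNat] at hc
      have : 'Z'.toNat = 90 := rfl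
      omega
    apply isalpha_of_lower
    unfold incA
    rw [hZ]
    simp only [Bool.false_eq_true, if_false]
    rw [islower_iff, toNat_ofNat_small (by omega)]
    omega

lemma incB_alpha {c : Char} (ha : PySem.Chars.isalpha c = true) :
    PySem.Chars.isalpha (incB c) = true := by
  unfold incB
  by_cases hZ : (c == 'Z') = true
  · rw [if_pos hZ]; decide
  · rw [if_neg hZ]
    by_cases hz : (c == 'z') = true
    · rw [if_pos hz]; decide
    · rw [if_neg hz]
      rcases isalpha_cases ha with hup | hlo
      · obtain ⟨h1, h2⟩ := (isupper_iff c).mp hup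
        have hne : c.toNat ≠ 90 := by
          intro hc
          apply hZ
          rw [beq_iff_eq, char_eq_iff_toNat]
          exact hc
        apply isalpha_of_upper
        rw [isupper_iff, toNat_ofNat_small (by omega)]
        omega
      · obtain ⟨h1, h2⟩ := (islower_iff c).mp hlo
        have hne : c.toNat ≠ 122 := by
          intro hc
          apply hz
          rw [beq_iff_eq, char_eq_iff_toNat]
          exact hc
        apply isalpha_of_lower
        rw [islower_iff, toNat_ofNat_small (by omega)]
        omega

lemma hits_zero_of_le {l : List Char} {p i : Nat} (h : i ≤ p + 1) : hits l p i = 0 := by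
  unfold hits seg
  rw [List.drop_eq_nil_of_le (by simp; omega)]
  rfl

lemma hits_full (l : List Char) (p : Nat) : hits l p l.length = mtot l p := by
  unfold hits seg mtot
  rw [List.take_of_length_le (le_refl _)]

lemma goBack_preserve : ∀ (m : Nat) (st : List Char) (q : Nat),
    PySem.Chars.isalpha (st.getD q ' ') = false →
    (goBack st m).getD q ' ' = st.getD q ' '
  | 0, st, q, _ => rfl
  | m+1, st, q, h => by
    simp only [goBack]
    by_cases ha : PySem.Chars.isalpha (st.getD m ' ') = true
    · rw [if_pos ha]
      have hmq : m ≠ q := by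
        intro he
        rw [he, h] at ha
        exact absurd ha (by simp)
      exact getD_set_ne' _ _ _ _ _ hmq
    · rw [if_neg ha]
      exact goBack_preserve m st q h

lemma stepA_preserve {st : List Char} {q : Nat} (i : Nat)
    (h : PySem.Chars.isalpha (st.getD q ' ') = false) :
    (stepA st i).getD q ' ' = st.getD q ' ' := by
  unfold stepA
  split
  · exact goBack_preserve i st q h
  · rfl

lemma foldA_nonalpha : ∀ (is : List Nat) (st : List Char) (q : Nat),
    PySem.Chars.isalpha (st.getD q ' ') = false →
    PySem.Chars.isalpha ((is.foldl stepA st).getD q ' ') = false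
  | [], _, _, h => h
  | i :: t, st, q, h => by
    rw [List.foldl_cons]
    exact foldA_nonalpha t (stepA st i) q (by rw [stepA_preserve i h]; exact h)

-- A's run, inside the overflow region: some originally-alphabetic position ends
-- up non-alphabetic (the first letter pushed past 'z' becomes '{' and is never
-- touched again)
lemma A_diff (l : List Char) (p : Nat) (hp : p < l.length)
    (hlo : PySem.Chars.islower (l.getD p ' ') = true)
    (hov : 123 ≤ mtot l p + (l.getD p ' ').toNat) :
    ∀ (k i : Nat) (st : List Char) (last : Int), i + k = l.length →
    st.length = l.length →
    (∀ j, ¬(j < i ∧ PySem.Chars.isalpha (l.getD j ' ') = true) →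
      st.getD j ' ' = l.getD j ' ') →
    (∀ j, j < i → PySem.Chars.isalpha (l.getD j ' ') = true →
      st.getD j ' ' = incA^[hits l j i] (l.getD j ' ')) →
    (∀ j, j < i → PySem.Chars.isalpha (l.getD j ' ') = true →
      PySem.Chars.isalpha (st.getD j ' ') = true) →
    lastSpec l i last →
    hits l p i + (l.getD p ' ').toNat ≤ 122 →
    ∃ q, q < l.length ∧ PySem.Chars.isalpha (l.getD q ' ') = true ∧
      PySem.Chars.isalpha (((List.range' i k).foldl stepA st).getD q ' ') = false
  | 0, i, st, last, hik, _, _, _, _, _, hbd => by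
    have hi : i = l.length := by omega
    subst hi
    rw [hits_full] at hbd
    omega
  | k+1, i, st, last, hik, hlen, hC2, hC3, hV, hLS, hbd => by
    have hi : i < l.length := by omega
    rw [List.range'_succ, List.foldl_cons]
    set c := l.getD i ' ' with hc
    have hsti : st.getD i ' ' = c := hC2 i (by omega)
    have halp : PySem.Chars.isalpha (l.getD p ' ') = true := isalpha_of_lower hlo
    have hcp122 : (l.getD p ' ').toNat ≤ 122 := ((islower_iff _).mp hlo).2
    by_cases hal : PySem.Chars.isalpha c = true
    · -- a letter: A does nothing
      have hA : stepA st i = st := by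
        unfold stepA
        rw [hsti, if_neg]
        simp only [beq_iff_eq]
        intro hcc
        rw [hcc] at hal
        rw [alpha_hash] at hal
        exact absurd hal (by simp)
      rw [hA]
      apply A_diff l p hp hlo hov k (i+1) st (i : Int) (by omega) hlen
      · intro j hj
        exact hC2 j (by
          intro ⟨h1, h2⟩
          exact hj ⟨by omega, h2⟩)
      · intro j hj hja
        by_cases hji : j = i
        · subst hji
          rw [hits_self, Function.iterate_zero_apply]
          exact hC2 j (by omega)
        · have hji' : j < i := by omega
          rw [hits_succ_no_hash hji' hi (Or.inl hal)]
          exact hC3 j hji' hja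
      · intro j hj hja
        by_cases hji : j = i
        · subst hji
          rw [hC2 j (by omega)]
          exact hja
        · exact hV j (by omega) hja
      · right
        exact ⟨i, rfl, by omega, hal, fun j h1 h2 => by omega⟩
      · by_cases hpi : i ≤ p
        · rw [hits_zero_of_le (by omega)]
          omega
        · have hpi' : p < i := by omega
          rw [hits_succ_no_hash hpi' hi (Or.inl hal)]
          exact hbd
    · have hal' : PySem.Chars.isalpha c = false := by
        cases h : PySem.Chars.isalpha c
        · rfl
        · exact absurd h hal
      by_cases hhash : c = '#'
      · rcases hLS with ⟨hl1, hl2⟩ | ⟨kk, hl1, hl2, hl3, hl4⟩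
        · -- no letter yet: no-op
          have hA : stepA st i = st := by
            unfold stepA
            rw [hsti, hhash, if_pos (by simp)]
            have h0 : goBack st (0 + i) = goBack st 0 := by
              apply goBack_skip
              intro j hj
              rw [Nat.zero_add]
              rw [hC2 j (by
                intro ⟨h1, h2⟩
                rw [hl2 j hj] at h2
                exact absurd h2 (by simp))]
              exact hl2 j hj
            rw [Nat.zero_add] at h0
            rw [h0]
            rfl
          rw [hA]
          apply A_diff l p hp hlo hov k (i+1) st last (by omega) hlen
          · intro j hj
            exact hC2 j (by
              intro ⟨h1, h2⟩
              exact hj ⟨by omega, h2⟩)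
          · intro j hj hja
            by_cases hji : j = i
            · subst hji
              rw [← hc] at hja
              rw [hja] at hal'
              exact absurd hal' (by simp)
            · have := hl2 j (by omega)
              rw [this] at hja
              exact absurd hja (by simp)
          · intro j hj hja
            by_cases hji : j = i
            · subst hji
              rw [← hc] at hja
              rw [hja] at hal'
              exact absurd hal' (by simp)
            · have := hl2 j (by omega)
              rw [this] at hja
              exact absurd hja (by simp)
          · left
            refine ⟨hl1, fun j hj => ?_⟩
            by_cases hji : j = i
            · subst hji
              rw [← hc, hhash]
              exact alpha_hash
            · exact hl2 j (by omega)
          · have hpi : i ≤ p := by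
              by_contra hpi
              have := hl2 p (by omega)
              rw [this] at halp
              exact absurd halp (by simp)
            rw [hits_zero_of_le (by omega)]
            omega
        · -- pointer at kk: A bumps position kk
          have hcur : PySem.Chars.isalpha (st.getD kk ' ') = true := hV kk hl2 hl3
          have hA : stepA st i = st.set kk (incA (st.getD kk ' ')) := by
            unfold stepA
            rw [hsti, hhash, if_pos (by simp)]
            have hsplit : i = (kk + 1) + (i - kk - 1) := by omega
            rw [hsplit]
            rw [goBack_skip (i - kk - 1) st (kk+1) (fun j hj => by
              have h1 : kk < kk + 1 + j := by omega
              have h2 : kk + 1 + j < i := by omega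
              rw [hC2 (kk+1+j) (by
                intro ⟨_, h3⟩
                rw [hl4 _ h1 h2] at h3
                exact absurd h3 (by simp))]
              exact hl4 _ h1 h2)]
            exact goBack_hit hcur
          rw [hA]
          by_cases hzz : st.getD kk ' ' = 'z'
          · -- the break: 'z' becomes '{', never touched again
            refine ⟨kk, by omega, hl3, ?_⟩
            apply foldA_nonalpha
            rw [getD_set_self' _ _ _ _ (by rw [hlen]; omega)]
            rw [hzz]
            decide
          · -- no break: the bumped char is still a letter
            have hzz' : (st.getD kk ' ').toNat ≠ 122 := by
              intro h122
              apply hzz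
              rw [char_eq_iff_toNat, h122]
              rfl
            have hnew : PySem.Chars.isalpha (incA (st.getD kk ' ')) = true :=
              incA_alpha_of_ne_z hcur hzz'
            have hstep_val : incA (st.getD kk ' ')
                = incA^[hits l kk (i+1)] (l.getD kk ' ') := by
              rw [hits_succ_hash hl2 hi (fun q h1 h2 => hl4 q h1 h2) hhash,
                Function.iterate_succ_apply', hC3 kk hl2 hl3]
            apply A_diff l p hp hlo hov k (i+1) (st.set kk (incA (st.getD kk ' ')))
              (kk : Int) (by omega) (by rw [List.length_set]; exact hlen)
            · intro j hj
              have hjk : j ≠ kk := by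
                intro h
                subst h
                exact hj ⟨by omega, hl3⟩
              rw [getD_set_ne' _ _ _ _ _ (fun h => hjk h.symm)]
              exact hC2 j (by
                intro ⟨h1, h2⟩
                exact hj ⟨by omega, h2⟩)
            · intro j hj hja
              by_cases hjk : j = kk
              · subst hjk
                rw [getD_set_self' _ _ _ _ (by rw [hlen]; omega)]
                exact hstep_val
              · rw [getD_set_ne' _ _ _ _ _ (fun h => hjk h.symm)]
                have hji : j < i := by
                  rcases Nat.lt_or_ge j i with h | h
                  · exact h
                  · have hji' : j = i := by omega
                    subst hji'
                    rw [← hc] at hja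
                    rw [hja] at hal'
                    exact absurd hal' (by simp)
                have hjkk : j < kk := by
                  rcases Nat.lt_or_ge j kk with h | h
                  · exact h
                  · have : kk < j := by omega
                    rw [hl4 j this hji] at hja
                    exact absurd hja (by simp)
                rw [hits_succ_of_alpha_between hji hi hjkk hl2 hl3]
                exact hC3 j hji hja
            · intro j hj hja
              by_cases hjk : j = kk
              · subst hjk
                rw [getD_set_self' _ _ _ _ (by rw [hlen]; omega)]
                exact hnew
              · rw [getD_set_ne' _ _ _ _ _ (fun h => hjk h.symm)]
                have hji : j < i := by
                  rcases Nat.lt_or_ge j i with h | h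
                  · exact h
                  · have hji' : j = i := by omega
                    subst hji'
                    rw [← hc] at hja
                    rw [hja] at hal'
                    exact absurd hal' (by simp)
                exact hV j hji hja
            · right
              refine ⟨kk, rfl, by omega, hl3, fun j h1 h2 => ?_⟩
              by_cases hji : j = i
              · subst hji
                rw [← hc, hhash]
                exact alpha_hash
              · exact hl4 j h1 (by omega)
            · by_cases hpk : p = kk
              · subst hpk
                rw [hits_succ_hash hl2 hi (fun q h1 h2 => hl4 q h1 h2) hhash]
                -- st[p] = orig + hits, still a letter and ≠ 'z', so hits + c ≤ 121
                have hC3p := hC3 p hl2 hl3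
                obtain ⟨hval, _⟩ := iter_lower (hits l p i) hlo (by omega)
                have : (st.getD p ' ').toNat = (l.getD p ' ').toNat + hits l p i := by
                  rw [hC3p, hval]
                omega
              · by_cases hpi : i ≤ p
                · rw [hits_zero_of_le (by omega)]
                  omega
                · have hpi' : p < i := by omega
                  have hpkk : p < kk := by
                    rcases Nat.lt_or_ge p kk with h | h
                    · exact h
                    · have : kk < p := by omega
                      rw [hl4 p this hpi'] at halp
                      exact absurd halp (by simp)
                  rw [hits_succ_of_alpha_between hpi' hi hpkk hl2 hl3]
                  exact hbd
      · -- an ordinary character: no-op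
        have hA : stepA st i = st := by
          unfold stepA
          rw [hsti, if_neg (by simpa using hhash)]
        rw [hA]
        apply A_diff l p hp hlo hov k (i+1) st last (by omega) hlen
        · intro j hj
          exact hC2 j (by
            intro ⟨h1, h2⟩
            exact hj ⟨by omega, h2⟩)
        · intro j hj hja
          by_cases hji : j = i
          · subst hji
            rw [← hc] at hja
            rw [hja] at hal'
            exact absurd hal' (by simp)
          · have hji' : j < i := by omega
            rw [hits_succ_no_hash hji' hi (Or.inr hhash)]
            exact hC3 j hji' hja
        · intro j hj hja
          by_cases hji : j = i
          · subst hji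
            rw [← hc] at hja
            rw [hja] at hal'
            exact absurd hal' (by simp)
          · exact hV j (by omega) hja
        · rcases hLS with ⟨hl1, hl2⟩ | ⟨kk, hl1, hl2, hl3, hl4⟩
          · left
            refine ⟨hl1, fun j hj => ?_⟩
            by_cases hji : j = i
            · subst hji
              exact hal'
            · exact hl2 j (by omega)
          · right
            refine ⟨kk, hl1, by omega, hl3, fun j h1 h2 => ?_⟩
            by_cases hji : j = i
            · subst hji
              exact hal'
            · exact hl4 j h1 (by omega)
        · by_cases hpi : i ≤ p
          · rw [hits_zero_of_le (by omega)]
            omega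
          · have hpi' : p < i := by omega
            rw [hits_succ_no_hash hpi' hi (Or.inr hhash)]
            exact hbd

-- B's run preserves, position by position, whether the character is a letter
lemma B_alpha (l : List Char) :
    ∀ (k i : Nat) (out : List Char) (last : Int), i + k = l.length →
    out.length = l.length →
    (∀ q, i ≤ q → out.getD q ' ' = l.getD q ' ') →
    (∀ q, PySem.Chars.isalpha (out.getD q ' ') = PySem.Chars.isalpha (l.getD q ' ')) →
    (0 ≤ last → ∃ kk : Nat, last = (kk : Int) ∧ kk < i ∧
      PySem.Chars.isalpha (out.getD kk ' ') = true) →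
    ∀ q, PySem.Chars.isalpha
        ((((PySem.List.enumerate (l.drop i) (i : Int)).foldl stepB (out, last)).1).getD q ' ')
      = PySem.Chars.isalpha (l.getD q ' ')
  | 0, i, out, last, hik, _, _, hAE, _ => by
    have hd : l.drop i = [] := List.drop_eq_nil_of_le (by omega)
    rw [hd]
    exact hAE
  | k+1, i, out, last, hik, hlen, hSuf, hAE, hPT => by
    have hi : i < l.length := by omega
    have hdrop : l.drop i = l.getD i ' ' :: l.drop (i+1) := by
      rw [List.getD_eq_getElem _ _ hi]
      exact List.drop_eq_getElem_cons hi
    rw [hdrop, PySem.List.enumerate_cons, List.foldl_cons]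
    have hcast : (i : Int) + 1 = ((i+1 : Nat) : Int) := by push_cast; ring
    set c := l.getD i ' ' with hc
    by_cases hal : PySem.Chars.isalpha c = true
    · have hB : stepB (out, last) ((i : Int), c) = (out, (i : Int)) := by
        unfold stepB
        rw [if_pos hal]
      rw [hB, hcast]
      apply B_alpha l k (i+1) out (i : Int) (by omega) hlen
      · intro q hq
        exact hSuf q (by omega)
      · exact hAE
      · intro _
        refine ⟨i, rfl, by omega, ?_⟩
        rw [hSuf i (le_refl i)]
        exact hal
    · have hal' : PySem.Chars.isalpha c = false := by
        cases h : PySem.Chars.isalpha c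
        · rfl
        · exact absurd h hal
      by_cases hcond : c = '#' ∧ 0 ≤ last
      · obtain ⟨kk, hl1, hl2, hl3⟩ := hPT hcond.2
        have hB : stepB (out, last) ((i : Int), c)
            = (out.set kk (incB (out.getD kk ' ')), last) := by
          unfold stepB
          rw [if_neg (by simp [hal']), if_pos hcond]
          rw [hl1]
          simp only [Int.toNat_natCast]
          rfl
        rw [hB, hcast]
        apply B_alpha l k (i+1) (out.set kk (incB (out.getD kk ' '))) last (by omega)
          (by rw [List.length_set]; exact hlen)
        · intro q hq
          rw [getD_set_ne' _ _ _ _ _ (by omega)]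
          exact hSuf q (by omega)
        · intro q
          by_cases hqk : q = kk
          · subst hqk
            rw [getD_set_self' _ _ _ _ (by rw [hlen]; omega)]
            rw [incB_alpha hl3, ← hAE q, hl3]
          · rw [getD_set_ne' _ _ _ _ _ (fun h => hqk h.symm)]
            exact hAE q
        · intro _
          refine ⟨kk, hl1, by omega, ?_⟩
          rw [getD_set_self' _ _ _ _ (by rw [hlen]; omega)]
          exact incB_alpha hl3
      · have hB : stepB (out, last) ((i : Int), c) = (out, last) := by
          unfold stepB
          rw [if_neg (by simp [hal']), if_neg hcond]
        rw [hB, hcast]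
        apply B_alpha l k (i+1) out last (by omega) hlen
        · intro q hq
          exact hSuf q (by omega)
        · exact hAE
        · intro hge
          obtain ⟨kk, hl1, hl2, hl3⟩ := hPT hge
          exact ⟨kk, hl1, by omega, hl3⟩

lemma tails_drop : ∀ (l t : List Char), t ∈ l.tails → ∃ p, p ≤ l.length ∧ l.drop p = t
  | [], t, ht => by
    simp only [show ([] : List Char).tails = [[]] from rfl, List.mem_singleton] at ht
    exact ⟨0, by omega, by simp [ht]⟩
  | a :: r, t, ht => by
    rw [List.tails_cons, List.mem_cons] at ht
    rcases ht with rfl | ht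
    · exact ⟨0, by omega, rfl⟩
    · obtain ⟨p, hp, hd⟩ := tails_drop r t ht
      exact ⟨p + 1, by simp; omega, by rw [List.drop_succ_cons]; exact hd⟩

theorem calculate_tight : Claim_exact_calculate := by
  intro s _hdom hd heq
  obtain ⟨t, htm, hpz⟩ := hd
  obtain ⟨p, hple, hdrop⟩ := tails_drop s.toList t htm
  set l := s.toList with hl
  -- t is nonempty (pastZ [] = false), so p < length and t = l[p] :: drop (p+1)
  have htne : t ≠ [] := by
    intro h
    rw [h] at hpz
    exact absurd hpz (by decide)
  have hp : p < l.length := by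
    rcases Nat.lt_or_ge p l.length with h | h
    · exact h
    · exact absurd (by rw [← hdrop]; exact List.drop_eq_nil_of_le h) htne
  have hdecomp : l.drop p = l.getD p ' ' :: l.drop (p+1) := by
    rw [List.getD_eq_getElem _ _ hp]
    exact List.drop_eq_getElem_cons hp
  rw [hdecomp] at hdrop
  rw [← hdrop] at hpz
  rw [show pastZ (l.getD p ' ' :: l.drop (p+1))
      = ((l.getD p ' ').isLower && decide (122 <
          ((l.drop (p+1)).takeWhile (fun x => !x.isAlpha)).count '#'
            + (l.getD p ' ').toNat)) from rfl] at hpz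
  rw [Bool.and_eq_true, decide_eq_true_eq] at hpz
  obtain ⟨hlow, hcnt⟩ := hpz
  rw [isLower_eq] at hlow
  have hfun : (fun x : Char => !x.isAlpha) = (fun x => !PySem.Chars.isalpha x) := by
    funext x
    rw [isAlpha_eq]
  rw [hfun] at hcnt
  have hov : 123 ≤ mtot l p + (l.getD p ' ').toNat := by
    unfold mtot
    omega
  -- A's output loses a letter at some position q …
  obtain ⟨q, hq, hqa, hqA⟩ := A_diff l p hp hlow hov l.length 0 l (-1) (by omega) rfl
    (fun j _ => rfl) (fun j hj _ => by omega) (fun j hj _ => by omega)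
    (Or.inl ⟨rfl, fun j hj => by omega⟩)
    (by rw [hits_zero_of_le (by omega)]
        have := ((islower_iff _).mp hlow).2
        omega)
  -- … while B's output keeps every letter
  have hqB := B_alpha l l.length 0 l (-1) (by omega) rfl (fun _ _ => rfl) (fun _ => rfl)
    (fun hge => by omega) q
  have hAl : (calculate s).toList = (List.range l.length).foldl stepA l := by
    show (String.ofList ((List.range l.length).foldl
      (fun st i => if st.getD i ' ' == '#' then goBack st i else st) l)).toList = _
    rw [String.toList_ofList]
    rfl
  have hBl : (calculate_alt s).toList
      = ((PySem.List.enumerate l 0).foldl stepB (l, -1)).1 := by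
    show (String.ofList ((PySem.List.enumerate l 0).foldl stepB (l, -1)).1).toList = _
    rw [String.toList_ofList]
  have hlists : (List.range l.length).foldl stepA l
      = ((PySem.List.enumerate l 0).foldl stepB (l, -1)).1 := by
    rw [← hAl, ← hBl, heq]
  rw [List.range_eq_range'] at hlists
  have h0 : PySem.List.enumerate l 0
      = PySem.List.enumerate (l.drop 0) ((0 : Nat) : Int) := by
    rw [List.drop_zero]
    norm_num
  rw [h0] at hlists
  rw [hlists] at hqA
  rw [hqB] at hqA
  rw [hqA] at hqa
  exact absurd hqa (by simp)
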